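-- pv_equiv track=rewrite | github.com/gurusaiedu/IntelliOps-Hackathon | hackathon-1.0/app1.py | formatAIResponse
-- ===== SOURCE A (Python) =====
-- def formatAIResponse(raw_memory_history):
--     full_string = raw_memory_history['history']
--     human_strings, ai_strings = [], []
--     current_speaker = None
--     for line in full_string.splitlines():
--         if line.startswith('Human:'):
--             current_speaker = 'Human'
--             human_strings.append(line.replace('Human:', '', 1).strip())
--         elif line.startswith('AI:'):
--             current_speaker = 'AI'
--             ai_strings.append(line.replace('AI:', '', 1).strip())
--         elif current_speaker:
--             human_strings[-1] += '\n' + line if current_speaker == 'Human' else ''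
--             ai_strings[-1] += '\n' + line if current_speaker == 'AI' else ''
--     return human_strings,ai_strings
-- ===== SOURCE B (Python) =====
-- def formatAIResponse(raw_memory_history):
--     blocks = []
--     for line in raw_memory_history['history'].splitlines():
--         if line.startswith('Human:'):
--             blocks.append(('Human', line.replace('Human:', '', 1).strip()))
--         elif line.startswith('AI:'):
--             blocks.append(('AI', line.replace('AI:', '', 1).strip()))
--         elif blocks:
--             s, t = blocks[-1]
--             blocks[-1] = (s, t + '\n' + line)
--     return ([t for s, t in blocks if s == 'Human'],
--             [t for s, t in blocks if s == 'AI'])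
-- ===== Notes on version B (the rewrite author's own statement) =====
-- stated objective: alternative
-- what changed: B replaces A's two threaded result lists plus a current_speaker flag with a single pass that builds one (speaker, text) block list and then partitions it into the two lists afterwards.
-- crash fix: A raises IndexError on histories containing a continuation line that follows a marker line but precedes the appearance of both a 'Human:' and an 'AI:' marker (and KeyError when the 'history' key is missing, where B raises too); on the IndexError inputs B attaches the continuation to the only existing block and returns both lists. — e.g. on formatAIResponse([("history", "AI: yo\ncont")]): A raises IndexError, B returns ([], ["yo\ncont"])
import Mathlib
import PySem

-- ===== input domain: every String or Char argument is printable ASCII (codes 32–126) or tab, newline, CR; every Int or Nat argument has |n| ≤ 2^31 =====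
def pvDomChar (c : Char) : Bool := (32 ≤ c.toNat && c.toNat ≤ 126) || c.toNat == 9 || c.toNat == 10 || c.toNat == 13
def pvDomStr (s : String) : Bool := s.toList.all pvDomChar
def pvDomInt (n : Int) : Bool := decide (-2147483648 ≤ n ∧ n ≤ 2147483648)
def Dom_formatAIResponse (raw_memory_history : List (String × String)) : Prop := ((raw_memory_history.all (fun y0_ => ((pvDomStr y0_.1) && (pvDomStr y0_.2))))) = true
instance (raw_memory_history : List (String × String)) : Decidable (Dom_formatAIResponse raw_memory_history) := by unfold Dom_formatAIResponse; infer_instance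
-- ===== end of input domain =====

-- B replaces A's two threaded result lists + speaker flag with one (speaker, text) block list
-- built in a single pass and partitioned afterwards (objective: alternative decomposition, same cost).
-- A raises on some inputs (KeyError / IndexError); those are outside Pre_ below.

-- shared helper: exact port of Python's s.replace(old, new, 1)
-- (splice at the first occurrence found by str.find; 'no occurrence' leaves s unchanged, exactly as CPython)
def pyReplaceOne (s old new : String) : String :=
  let i := PySem.Str.find s old
  if i < 0 then s
  else String.ofList (s.toList.take i.toNat ++ new.toList ++ s.toList.drop (i.toNat + old.toList.length))

-- ===== PORT A =====
-- models xs[-1] += t; on [] Python raises IndexError (excluded by Pre_), the port leaves xs unchanged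
def pvAddLast (xs : List String) (t : String) : List String :=
  match xs.getLast? with
  | none => xs
  | some x => xs.dropLast ++ [x ++ t]

-- the body of A's for-loop, state = (human_strings, ai_strings, current_speaker)
def pvStepA (st : List String × List String × Option String) (line : String) :
    List String × List String × Option String :=
  match st with
  | (hs, as, spk) =>
    if PySem.Str.startswith line "Human:" then
      (hs ++ [PySem.Str.strip (pyReplaceOne line "Human:" "")], as, some "Human")
    else if PySem.Str.startswith line "AI:" then
      (hs, as ++ [PySem.Str.strip (pyReplaceOne line "AI:" "")], some "AI")
    else
      match spk with
      | none => (hs, as, none)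
      | some sp =>
        (pvAddLast hs (if sp == "Human" then "\n" ++ line else ""),
         pvAddLast as (if sp == "AI" then "\n" ++ line else ""),
         some sp)

def formatAIResponse (raw_memory_history : List (String × String)) : List String × List String :=
  match (PySem.Dict.mk raw_memory_history).get? "history" with
  | none => ([], [])   -- KeyError in Python; excluded by Pre_
  | some full_string =>
    let r := (PySem.Str.splitlines full_string).foldl pvStepA ([], [], none)
    (r.1, r.2.1)

-- ===== PORT B =====
def pvHumans (bs : List (String × String)) : List String :=
  (bs.filter (fun b => b.1 == "Human")).map Prod.snd

def pvAIs (bs : List (String × String)) : List String :=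
  (bs.filter (fun b => b.1 == "AI")).map Prod.snd

-- the body of B's for-loop over the single block list
def pvStepB (bs : List (String × String)) (line : String) : List (String × String) :=
  if PySem.Str.startswith line "Human:" then
    bs ++ [("Human", PySem.Str.strip (pyReplaceOne line "Human:" ""))]
  else if PySem.Str.startswith line "AI:" then
    bs ++ [("AI", PySem.Str.strip (pyReplaceOne line "AI:" ""))]
  else
    match bs.getLast? with   -- 'elif blocks:' guard + blocks[-1] = (s, t + '\n' + line)
    | none => bs
    | some (s, t) => bs.dropLast ++ [(s, t ++ "\n" ++ line)]

def formatAIResponse_alt (raw_memory_history : List (String × String)) : List String × List String :=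
  match (PySem.Dict.mk raw_memory_history).get? "history" with
  | none => ([], [])   -- KeyError in Python; excluded by Pre_
  | some full_string =>
    let blocks := (PySem.Str.splitlines full_string).foldl pvStepB []
    (pvHumans blocks, pvAIs blocks)

-- ===== PRECONDITION & SPEC =====
def pvIsMarker (l : String) : Bool :=
  PySem.Str.startswith l "Human:" || PySem.Str.startswith l "AI:"

-- a non-marker line at position i is safe iff no marker precedes it (speaker still None)
-- or both a 'Human:' and an 'AI:' marker precede it (both lists nonempty)
def pvContOk (ls : List String) : Bool :=
  (List.range ls.length).all fun i =>
    pvIsMarker (ls.getD i "") ||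
    (ls.take i).all (fun m => !pvIsMarker m) ||
    (((ls.take i).any (fun m => PySem.Str.startswith m "Human:")) &&
     ((ls.take i).any (fun m => PySem.Str.startswith m "AI:")))

-- Pre_ excludes exactly the inputs where the Python A raises: a missing 'history' key (KeyError) and
-- histories with a continuation line after the first marker but before both speakers appeared (IndexError).
def Pre_formatAIResponse (raw_memory_history : List (String × String)) : Prop :=
  (((PySem.Dict.mk raw_memory_history).get? "history").elim false
    (fun h => pvContOk (PySem.Str.splitlines h))) = true

instance (raw_memory_history : List (String × String)) : Decidable (Pre_formatAIResponse raw_memory_history) := by unfold Pre_formatAIResponse; infer_instance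

def pvWitness_formatAIResponse : (List (String × String)) := [("history", "Human: hi\nAI: yo\nmore")]

-- A raises IndexError on histories with a continuation line that follows a marker line but precedes the
-- appearance of both a 'Human:' and an 'AI:' marker; B attaches it to the only existing block and returns.
def Raises_formatAIResponse (raw_memory_history : List (String × String)) : Prop :=
  (((PySem.Dict.mk raw_memory_history).get? "history").elim false
    (fun h => !pvContOk (PySem.Str.splitlines h))) = true

instance (raw_memory_history : List (String × String)) : Decidable (Raises_formatAIResponse raw_memory_history) := by unfold Raises_formatAIResponse; infer_instance

def pvRaiseWitness_formatAIResponse : (List (String × String)) := [("history", "AI: yo\ncont")]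
def pvRaiseWitnessOut_formatAIResponse : List String × List String := ([], ["yo\ncont"])

def Spec_formatAIResponse (raw_memory_history : List (String × String)) (out : List String × List String) : Prop := out = formatAIResponse_alt raw_memory_history
instance (raw_memory_history : List (String × String)) (out : List String × List String) : Decidable (Spec_formatAIResponse raw_memory_history out) := by unfold Spec_formatAIResponse; infer_instance

-- ===== CLAIM (what is proved, stated in full; the proofs are below) =====
def Claim_equal_formatAIResponse : Prop := ∀ (raw_memory_history : List (String × String)), Dom_formatAIResponse raw_memory_history → Pre_formatAIResponse raw_memory_history → Spec_formatAIResponse raw_memory_history (formatAIResponse raw_memory_history)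

def Claim_raises_formatAIResponse : Prop := (∀ (raw_memory_history : List (String × String)), Dom_formatAIResponse raw_memory_history → Raises_formatAIResponse raw_memory_history → ¬ Pre_formatAIResponse raw_memory_history) ∧ (Dom_formatAIResponse (pvRaiseWitness_formatAIResponse) ∧ Raises_formatAIResponse (pvRaiseWitness_formatAIResponse) ∧ formatAIResponse_alt (pvRaiseWitness_formatAIResponse) = pvRaiseWitnessOut_formatAIResponse)

-- ===== LEMMAS AND PROOFS =====
def pvLastSpk (bs : List (String × String)) : Option String := bs.getLast?.map Prod.fst

def pvWF (bs : List (String × String)) : Prop := ∀ b ∈ bs, b.1 = "Human" ∨ b.1 = "AI"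

theorem pvAddLast_empty_str (xs : List String) : pvAddLast xs "" = xs := by
  unfold pvAddLast
  cases h : xs.getLast? with
  | none => rfl
  | some x =>
    obtain ⟨ys, rfl⟩ := List.getLast?_eq_some_iff.mp h
    simp

theorem pvAddLast_concat (ys : List String) (y t : String) :
    pvAddLast (ys ++ [y]) t = ys ++ [y ++ t] := by
  unfold pvAddLast; simp

theorem pvStep_comm (bs : List (String × String)) (line : String) (hwf : pvWF bs) :
    pvStepA (pvHumans bs, pvAIs bs, pvLastSpk bs) line =
      (pvHumans (pvStepB bs line), pvAIs (pvStepB bs line), pvLastSpk (pvStepB bs line)) := by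
  unfold pvStepA pvStepB
  cases hH : PySem.Str.startswith line "Human:" with
  | true =>
    simp only [if_true]
    simp [pvHumans, pvAIs, pvLastSpk, List.filter_append]
  | false =>
    cases hA : PySem.Str.startswith line "AI:" with
    | true =>
      simp only [Bool.false_eq_true, if_false, if_true]
      simp [pvHumans, pvAIs, pvLastSpk, List.filter_append]
    | false =>
      simp only [Bool.false_eq_true, if_false]
      cases h : bs.getLast? with
      | none =>
        rw [List.getLast?_eq_none_iff] at h
        subst h
        simp [pvLastSpk, pvHumans, pvAIs]
      | some b =>
        obtain ⟨s, t⟩ := b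
        obtain ⟨ys, rfl⟩ := List.getLast?_eq_some_iff.mp h
        have hs : s = "Human" ∨ s = "AI" := hwf (s, t) (by simp)
        rcases hs with rfl | rfl
        · simp [pvLastSpk, pvHumans, pvAIs, List.filter_append, pvAddLast_empty_str,
            pvAddLast_concat, String.append_assoc]
        · simp [pvLastSpk, pvHumans, pvAIs, List.filter_append, pvAddLast_empty_str,
            pvAddLast_concat, String.append_assoc]

theorem pvStep_wf (bs : List (String × String)) (line : String) (hwf : pvWF bs) :
    pvWF (pvStepB bs line) := by
  unfold pvStepB
  cases hH : PySem.Str.startswith line "Human:" with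
  | true =>
    simp only [if_true]
    intro b hb
    rcases List.mem_append.mp hb with h | h
    · exact hwf b h
    · simp at h; subst h; left; rfl
  | false =>
    cases hA : PySem.Str.startswith line "AI:" with
    | true =>
      simp only [Bool.false_eq_true, if_false, if_true]
      intro b hb
      rcases List.mem_append.mp hb with h | h
      · exact hwf b h
      · simp at h; subst h; right; rfl
    | false =>
      simp only [Bool.false_eq_true, if_false]
      cases h : bs.getLast? with
      | none => exact hwf
      | some b =>
        obtain ⟨s, t⟩ := b
        obtain ⟨ys, rfl⟩ := List.getLast?_eq_some_iff.mp h
        have hs : s = "Human" ∨ s = "AI" := hwf (s, t) (by simp)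
        intro c hc
        simp only [List.dropLast_concat] at hc
        rcases List.mem_append.mp hc with hm | hm
        · exact hwf c (List.mem_append.mpr (Or.inl hm))
        · simp at hm; subst hm; exact hs

theorem pvFold_comm (ls : List String) (bs : List (String × String)) (hwf : pvWF bs) :
    ls.foldl pvStepA (pvHumans bs, pvAIs bs, pvLastSpk bs) =
      (pvHumans (ls.foldl pvStepB bs), pvAIs (ls.foldl pvStepB bs),
       pvLastSpk (ls.foldl pvStepB bs)) := by
  induction ls generalizing bs with
  | nil => rfl
  | cons l ls ih =>
    simp only [List.foldl_cons]
    rw [pvStep_comm bs l hwf]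
    exact ih (pvStepB bs l) (pvStep_wf bs l hwf)

-- ===== VERDICT (by name: the statement is the Claim_ definition above) =====
theorem formatAIResponse_spec : Claim_equal_formatAIResponse := by
  intro raw _ _
  unfold Spec_formatAIResponse formatAIResponse formatAIResponse_alt
  cases h : (PySem.Dict.mk raw).get? "history" with
  | none => rfl
  | some full =>
    have hwf : pvWF ([] : List (String × String)) := by intro b hb; simp at hb
    have := pvFold_comm (PySem.Str.splitlines full) [] hwf
    simp only [pvHumans, pvAIs, pvLastSpk, List.filter_nil, List.map_nil,
      List.getLast?_nil, Option.map_none] at this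
    simp [this, pvHumans, pvAIs]
theorem formatAIResponse_raises : Claim_raises_formatAIResponse := by
  unfold Claim_raises_formatAIResponse
  constructor
  · intro raw _ hr hp
    unfold Raises_formatAIResponse at hr
    unfold Pre_formatAIResponse at hp
    cases h : (PySem.Dict.mk raw).get? "history" with
    | none => rw [h] at hp; simp at hp
    | some full => rw [h] at hr hp; simp at hr hp; rw [hp] at hr; simp at hr
  · exact ⟨by decide, by decide, by decide⟩

-- self-check: the crash witness really lies outside Pre_ (A raises there; B's value is pinned above)
theorem pvRaiseWitness_ok :
    Raises_formatAIResponse pvRaiseWitness_formatAIResponse ∧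
      ¬ Pre_formatAIResponse pvRaiseWitness_formatAIResponse :=
  ⟨formatAIResponse_raises.2.2.1,
   formatAIResponse_raises.1 _ (by decide) formatAIResponse_raises.2.2.1⟩
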